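-- pv_equiv track=rewrite | github.com/LoneRangerIsHere/word_crack | perm.py | poss_combination
-- ===== SOURCE A (Python) =====
-- import itertools
--
-- def poss_combination(string):
--
-- 	length = len(string)
--
-- 	n =0
-- 	k = []
-- 	for p in range(2,length+1):							#loop to get words of size from to n
-- 		for i in itertools.permutations(string,p):		#returns all possible permutaion of given words of size p
-- 			k.append(''.join(map(str,i)))
--
-- 	return k
-- ===== SOURCE B (Python) =====
-- def _poss_rec(string, n, used, prefix, remaining):
--     if remaining == 0:
--         return [''.join(prefix)]
--     res = []
--     for i in range(n):
--         if i not in used: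
--             res.extend(_poss_rec(string, n, used + [i], prefix + [string[i]], remaining - 1))
--     return res
--
--
-- def poss_combination(string):
--     n = len(string)
--     out = []
--     for p in range(2, n + 1):
--         out.extend(_poss_rec(string, n, [], [], p))
--     return out
-- ===== Notes on version B (the rewrite author's own statement) =====
-- stated objective: alternative
-- what changed: Replaces itertools.permutations (filtering index tuples from the full Cartesian product) with an explicit backtracking recursion over character positions that maintains a used-index list and a prefix, emitting strings in the same index-lexicographic order.
import Mathlib
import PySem

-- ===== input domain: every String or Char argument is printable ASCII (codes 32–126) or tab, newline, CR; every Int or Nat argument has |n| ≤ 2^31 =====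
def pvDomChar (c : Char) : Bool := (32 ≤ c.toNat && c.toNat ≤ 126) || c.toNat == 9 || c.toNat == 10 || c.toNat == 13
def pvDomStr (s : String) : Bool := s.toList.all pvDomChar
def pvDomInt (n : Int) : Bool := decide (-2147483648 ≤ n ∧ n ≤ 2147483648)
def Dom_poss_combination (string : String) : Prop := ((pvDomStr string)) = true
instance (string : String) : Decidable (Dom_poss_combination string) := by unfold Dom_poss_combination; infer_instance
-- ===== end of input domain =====

-- B replaces itertools.permutations with an explicit backtracking recursion over
-- character positions (used-index list + prefix); same output, same order (alternative).

-- ===== PORT A =====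
-- boolean membership test on index lists (list.__contains__ / 'len(set(..)) == r' building block)
def pvMemB (u : List Nat) (i : Nat) : Bool :=
  match u with
  | [] => false
  | j :: t => (j == i) || pvMemB t i

-- all indices distinct (itertools' 'len(set(indices)) == r' filter)
def pvNodupB (t : List Nat) : Bool :=
  match t with
  | [] => true
  | i :: s => (!pvMemB s i) && pvNodupB s

-- product(range n, repeat = r) in lexicographic order
def pvIdxTuples (n r : Nat) : List (List Nat) :=
  match r with
  | 0 => [[]]
  | r + 1 => (List.range n).flatMap (fun i => (pvIdxTuples n r).map (fun t => i :: t))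

-- itertools.permutations(string, p), ported per its documented equivalent:
-- index tuples from product(range(n), repeat=p) filtered to distinct indices, mapped to chars
def pvPermsA (cs : List Char) (p : Nat) : List String :=
  ((pvIdxTuples cs.length p).filter pvNodupB).map
    (fun t => String.mk (t.map (fun i => cs.getD i ' ')))

def poss_combination (string : String) : List String :=
  let cs := string.toList
  let length := cs.length
  (PySem.List.pyRange 2 ((length : Int) + 1) 1).foldl
    (fun k p => (pvPermsA cs p.toNat).foldl (fun k s => k ++ [s]) k)
    []

-- ===== PORT B =====
-- backtracking recursion: iterate positions left to right, skip used ones, emit at remaining = 0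
def pvRec (cs : List Char) (used : List Nat) (pref : List Char) (remaining : Nat) : List String :=
  match remaining with
  | 0 => [String.mk pref]
  | r + 1 => (List.range cs.length).flatMap
      (fun i => if pvMemB used i then []
                else pvRec cs (used ++ [i]) (pref ++ [cs.getD i ' ']) r)

def poss_combination_alt (string : String) : List String :=
  let cs := string.toList
  (List.range' 2 (cs.length - 1)).flatMap (fun p => pvRec cs [] [] p)

-- ===== PRECONDITION & SPEC =====
def Spec_poss_combination (string : String) (out : List String) : Prop := out = poss_combination_alt string
instance (string : String) (out : List String) : Decidable (Spec_poss_combination string out) := by unfold Spec_poss_combination; infer_instance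

-- ===== CLAIM (what is proved, stated in full; the proofs are below) =====
def Claim_equal_poss_combination : Prop := ∀ (string : String), Dom_poss_combination string → Spec_poss_combination string (poss_combination string)

-- ===== LEMMAS AND PROOFS =====

theorem pvMemB_append (u : List Nat) (i j : Nat) :
    pvMemB (u ++ [i]) j = (pvMemB u j || (i == j)) := by
  induction u with
  | nil => simp [pvMemB]
  | cons a t ih => simp [pvMemB, ih, Bool.or_assoc]

-- all elements of t are out of u
def pvDisjB (t : List Nat) (u : List Nat) : Bool :=
  match t with
  | [] => true
  | j :: s => (!pvMemB u j) && pvDisjB s u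

theorem pvDisjB_nil (t : List Nat) : pvDisjB t [] = true := by
  induction t with
  | nil => rfl
  | cons j s ih => simp [pvDisjB, pvMemB, ih]

theorem pvDisjB_append (t u : List Nat) (i : Nat) :
    pvDisjB t (u ++ [i]) = (pvDisjB t u && !pvMemB t i) := by
  induction t with
  | nil => rfl
  | cons j s ih =>
    have hc : (i == j) = (j == i) := by
      by_cases hij : i = j
      · simp [hij]
      · simp [hij, (Ne.symm hij : j ≠ i)]
    simp only [pvDisjB, pvMemB, ih, pvMemB_append, hc]
    cases pvMemB u j <;> cases pvMemB s i <;> cases pvDisjB s u <;> cases (j == i) <;> decide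

theorem filter_flatMap_list {α β : Type} (l : List α) (f : α → List β) (p : β → Bool) :
    (l.flatMap f).filter p = l.flatMap (fun a => (f a).filter p) := by
  induction l with
  | nil => rfl
  | cons a t ih => simp [List.flatMap_cons, List.filter_append, ih]

-- the backtracking recursion enumerates exactly the filtered index tuples, in order
theorem pvRec_eq (cs : List Char) (r : Nat) :
    ∀ (used : List Nat) (pref : List Char),
      pvRec cs used pref r =
        ((pvIdxTuples cs.length r).filter (fun t => pvDisjB t used && pvNodupB t)).map
          (fun t => String.mk (pref ++ t.map (fun i => cs.getD i ' '))) := by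
  induction r with
  | zero =>
    intro used pref
    simp [pvRec, pvIdxTuples, pvDisjB, pvNodupB, List.filter]
  | succ r ih =>
    intro used pref
    simp only [pvRec, pvIdxTuples, filter_flatMap_list, List.map_flatMap]
    refine congrArg (fun g => List.flatMap g (List.range cs.length)) (funext fun i => ?_)
    rw [List.filter_map, List.map_map]
    by_cases h : pvMemB used i = true
    · simp [h, pvDisjB, pvNodupB, Function.comp_def]
    · rw [ih]
      have hb : ∀ t : List Nat,
          (pvDisjB t (used ++ [i]) && pvNodupB t)
            = (pvDisjB (i :: t) used && pvNodupB (i :: t)) := by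
        intro t
        simp only [Bool.not_eq_true] at h
        simp only [pvDisjB, pvNodupB, pvDisjB_append, h]
        cases pvDisjB t used <;> cases pvNodupB t <;> cases pvMemB t i <;> decide
      simp only [h, Function.comp_def, hb]
      refine List.map_congr_left fun t _ => ?_
      simp

theorem foldl_append_singleton' (l : List String) (k : List String) :
    l.foldl (fun k s => k ++ [s]) k = k ++ l :=
  PySem.List.foldl_append_singleton_eq_self l k

theorem pyRange_two (n : Nat) :
    PySem.List.pyRange 2 ((n : Int) + 1) 1
      = (List.range' 2 (n - 1)).map (fun p : Nat => (p : Int)) := by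
  rcases Nat.lt_or_ge n 2 with h | h
  · interval_cases n <;> simp [PySem.List.pyRange_one_eq_nil, List.range']
  · rw [PySem.List.pyRange_one]
    have h1 : ((n : Int) + 1 - 2).toNat = n - 1 := by omega
    rw [h1, List.range'_eq_map_range]
    simp [List.map_map, Function.comp_def]

-- ===== VERDICT (by name: the statement is the Claim_ definition above) =====
theorem poss_combination_spec : Claim_equal_poss_combination := by
  intro s _
  simp only [Spec_poss_combination, poss_combination, poss_combination_alt]
  set cs := s.toList with hcs
  rw [pyRange_two, List.foldl_map]
  have hstep : ∀ (k : List String) (p : Nat),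
      (pvPermsA cs ((p : Int)).toNat).foldl (fun k s => k ++ [s]) k
        = k ++ pvRec cs [] [] p := by
    intro k p
    rw [foldl_append_singleton', pvRec_eq]
    have : (fun t => pvDisjB t [] && pvNodupB t) = pvNodupB := by
      funext t; simp [pvDisjB_nil]
    simp [pvPermsA, this]
  refine (PySem.List.foldl_congr_mem _ _ (fun k p => k ++ pvRec cs [] [] p) []
        (fun acc x _ => hstep acc x)).trans ?_
  simpa using PySem.List.foldl_append_eq_flatMap (fun p => pvRec cs [] [] p) (List.range' 2 (cs.length - 1)) []
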